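-- pv_equiv track=rewrite | github.com/JosueCris/Intro_IA | IIA/Recursion/countHi2.py | count_hi2
-- ===== SOURCE A (Python) =====
-- def count_hi2(str):
--     if(len(str) < 2):
--         return 0
--     if str[:2] == "hi":
--         return 1 + count_hi2(str[2:])
--     if len(str)>2 and str[:3]=="xhi":
--         return count_hi2(str[3:])
--     return count_hi2(str[1:])
-- ===== SOURCE B (Python) =====
-- def count_hi2(str):
--     return str.count('hi') - str.count('xhi')
-- ===== Notes on version B (the rewrite author's own statement) =====
-- stated objective: faster
-- what changed: Replaced the per-position recursion with slicing by two aggregate substring counts: every 'hi' is counted and the ones preceded by 'x' are exactly the 'xhi' occurrences, so the answer is str.count('hi') - str.count('xhi').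
import Mathlib
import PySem

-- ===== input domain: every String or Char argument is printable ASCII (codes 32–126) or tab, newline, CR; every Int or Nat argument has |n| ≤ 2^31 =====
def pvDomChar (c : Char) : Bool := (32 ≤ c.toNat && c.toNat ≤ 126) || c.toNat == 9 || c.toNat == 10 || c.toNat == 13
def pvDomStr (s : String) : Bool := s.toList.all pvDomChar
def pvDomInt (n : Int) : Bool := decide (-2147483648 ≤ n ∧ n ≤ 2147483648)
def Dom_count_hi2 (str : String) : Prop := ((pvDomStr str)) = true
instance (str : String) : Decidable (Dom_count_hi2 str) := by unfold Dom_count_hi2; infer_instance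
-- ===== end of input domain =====

-- B replaces A's per-position recursion by two aggregate substring counts: count('hi') - count('xhi'); measured faster only if a timing run says so.


-- ===== PORT A =====
-- A's recursion on the string, step for step over its code points (Python's str
-- slicing/len are PySem.Chars.slice/len on the character list).
def countHi2Chars (s : List Char) : Int :=
  if PySem.Chars.len s < 2 then 0
  else if PySem.Chars.slice s none (some 2) = ['h','i'] then
    1 + countHi2Chars (PySem.Chars.slice s (some 2) none)
  else if PySem.Chars.len s > 2 ∧ PySem.Chars.slice s none (some 3) = ['x','h','i'] then
    countHi2Chars (PySem.Chars.slice s (some 3) none)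
  else
    countHi2Chars (PySem.Chars.slice s (some 1) none)
termination_by s.length
decreasing_by
  all_goals
    simp only [PySem.Chars.len] at *
    simp [pysem]
    omega

def count_hi2 (str : String) : Int := countHi2Chars str.toList

-- ===== PORT B =====
-- B: return str.count('hi') - str.count('xhi')
def count_hi2_alt (str : String) : Int :=
  (PySem.Str.count str "hi" : Int) - (PySem.Str.count str "xhi" : Int)

-- ===== PRECONDITION & SPEC =====
def Spec_count_hi2 (str : String) (out : Int) : Prop := out = count_hi2_alt str
instance (str : String) (out : Int) : Decidable (Spec_count_hi2 str out) := by unfold Spec_count_hi2; infer_instance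

-- ===== CLAIM (what is proved, stated in full; the proofs are below) =====
def Claim_equal_count_hi2 : Prop := ∀ (str : String), Dom_count_hi2 str → Spec_count_hi2 str (count_hi2 str)

-- ===== LEMMAS AND PROOFS =====

-- the accumulator of Chars.count.go shifts out additively
theorem countGo_acc (sub : List Char) :
    ∀ (fuel : Nat) (l : List Char) (acc : Nat),
      PySem.Chars.count.go sub fuel l acc = acc + PySem.Chars.count.go sub fuel l 0 := by
  intro fuel
  induction fuel with
  | zero => intro l acc; simp [PySem.Chars.count.go]
  | succ f ih =>
      intro l acc
      cases l with
      | nil => simp [PySem.Chars.count.go]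
      | cons c t =>
        by_cases hp : sub.isPrefixOf (c::t) = true
        · simp only [PySem.Chars.count.go, hp, if_true]
          rw [ih _ (acc+1), ih _ (0+1)]
          omega
        · simp only [PySem.Chars.count.go, hp, Bool.false_eq_true, if_false]
          rw [ih t acc]

-- the fuel of Chars.count.go is irrelevant as long as it covers the list length
theorem countGo_fuel (sub : List Char) (hsub : sub ≠ []) :
    ∀ (fuel₁ fuel₂ : Nat) (l : List Char), l.length ≤ fuel₁ → l.length ≤ fuel₂ →
      PySem.Chars.count.go sub fuel₁ l 0 = PySem.Chars.count.go sub fuel₂ l 0 := by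
  intro fuel₁
  induction fuel₁ with
  | zero => intro fuel₂ l h1 h2
            have : l = [] := by cases l <;> simp_all
            subst this; cases fuel₂ <;> simp [PySem.Chars.count.go]
  | succ f ih =>
      intro fuel₂ l h1 h2
      cases l with
      | nil => cases fuel₂ <;> simp [PySem.Chars.count.go]
      | cons c t =>
        have hs : 1 ≤ sub.length := by cases sub <;> simp_all
        obtain ⟨f₂, rfl⟩ : ∃ f₂, fuel₂ = f₂ + 1 := by
          cases fuel₂ with
          | zero => simp at h2
          | succ k => exact ⟨k, rfl⟩
        by_cases hp : sub.isPrefixOf (c::t) = true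
        · simp only [PySem.Chars.count.go, hp, if_true]
          rw [countGo_acc sub f _ (0+1), countGo_acc sub f₂ _ (0+1)]
          have hd1 : (List.drop sub.length (c::t)).length ≤ f := by
            simp [List.length_drop] at *; omega
          have hd2 : (List.drop sub.length (c::t)).length ≤ f₂ := by
            simp [List.length_drop] at *; omega
          rw [ih f₂ _ hd1 hd2]
        · simp only [PySem.Chars.count.go, hp, Bool.false_eq_true, if_false]
          exact ih f₂ t (by simp at h1; omega) (by simp at h2; omega)

theorem count_nil (sub : List Char) (hsub : sub ≠ []) :
    PySem.Chars.count [] sub = 0 := by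
  cases sub <;> simp_all [PySem.Chars.count, PySem.Chars.count.go]

theorem count_cons (sub : List Char) (hsub : sub ≠ []) (c : Char) (t : List Char) :
    PySem.Chars.count (c::t) sub =
      (if sub.isPrefixOf (c::t) then 1 + PySem.Chars.count (List.drop sub.length (c::t)) sub
       else PySem.Chars.count t sub) := by
  have hse : sub.isEmpty = false := by cases sub <;> simp_all
  have hs : 1 ≤ sub.length := by cases sub <;> simp_all
  simp only [PySem.Chars.count, hse, Bool.false_eq_true, if_false]
  by_cases hp : sub.isPrefixOf (c::t) = true
  · simp only [PySem.Chars.count.go, List.length_cons, hp, if_true]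
    rw [countGo_acc sub t.length _ (0+1),
        countGo_fuel sub hsub t.length (List.drop sub.length (c::t)).length _
          (by simp [List.length_drop]; omega) (le_refl _)]
  · simp only [PySem.Chars.count.go, List.length_cons, hp, Bool.false_eq_true, if_false]

-- main characterisation: A's recursion equals count('hi') - count('xhi')
set_option maxHeartbeats 1000000 in
theorem countHi2Chars_aux : ∀ (n : Nat) (l : List Char), l.length ≤ n →
    countHi2Chars l =
      (PySem.Chars.count l ['h','i'] : Int) - (PySem.Chars.count l ['x','h','i'] : Int) := by
  intro n
  induction n with
  | zero =>
      intro l hl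
      have : l = [] := by cases l <;> simp_all
      subst this
      rw [countHi2Chars]
      simp [PySem.Chars.len, count_nil]
  | succ n ih =>
      intro l hl
      match l with
      | [] =>
          rw [countHi2Chars]; simp [PySem.Chars.len, count_nil]
      | [c] =>
          rw [countHi2Chars]
          simp [PySem.Chars.len, count_cons, count_nil, List.isPrefixOf]
      | a :: b :: t =>
          rw [countHi2Chars]
          have hlen : ¬ (PySem.Chars.len (a::b::t) < 2) := by
            simp [PySem.Chars.len]
          rw [if_neg hlen]
          by_cases hhi : PySem.Chars.slice (a::b::t) none (some 2) = ['h','i']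
          · obtain ⟨rfl, rfl⟩ : a = 'h' ∧ b = 'i' := by
              simpa [pysem] using hhi
            rw [if_pos hhi,
                show PySem.Chars.slice ('h'::'i'::t) (some 2) none = t by simp [pysem],
                ih t (by simp at hl; omega)]
            rw [count_cons ['h','i'] (by simp) 'h' ('i'::t),
                count_cons ['x','h','i'] (by simp) 'h' ('i'::t),
                count_cons ['x','h','i'] (by simp) 'i' t]
            simp [List.isPrefixOf]
            omega
          · rw [if_neg hhi]
            have hab : ¬ (a = 'h' ∧ b = 'i') := by
              intro ⟨ha, hb⟩; subst ha; subst hb; exact hhi (by simp [pysem])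
            have hcntHi : PySem.Chars.count (a::b::t) ['h','i'] =
                PySem.Chars.count (b::t) ['h','i'] := by
              rw [count_cons ['h','i'] (by simp) a (b::t)]
              have : ['h','i'].isPrefixOf (a::b::t) = false := by
                simp [List.isPrefixOf]
                intro ha hb; exact hab ⟨ha.symm, hb.symm⟩
              simp [this]
            by_cases hx : PySem.Chars.len (a::b::t) > 2 ∧
                PySem.Chars.slice (a::b::t) none (some 3) = ['x','h','i']
            · match t with
              | [] =>
                  exfalso
                  have := hx.2
                  simp [pysem] at this
              | c :: t' =>
                  obtain ⟨rfl, rfl, rfl⟩ : a = 'x' ∧ b = 'h' ∧ c = 'i' := by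
                    have := hx.2
                    simpa [pysem] using this
                  rw [if_pos hx,
                      show PySem.Chars.slice ('x'::'h'::'i'::t') (some 3) none = t' by
                        simp [pysem],
                      ih t' (by simp at hl; omega)]
                  rw [count_cons ['h','i'] (by simp) 'x' ('h'::'i'::t'),
                      count_cons ['h','i'] (by simp) 'h' ('i'::t'),
                      count_cons ['x','h','i'] (by simp) 'x' ('h'::'i'::t')]
                  simp [List.isPrefixOf]
                  try omega
            · rw [if_neg hx,
                  show PySem.Chars.slice (a::b::t) (some 1) none = b::t by simp [pysem],
                  ih (b::t) (by simp at hl ⊢; omega)]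
              have hcntXhi : PySem.Chars.count (a::b::t) ['x','h','i'] =
                  PySem.Chars.count (b::t) ['x','h','i'] := by
                rw [count_cons ['x','h','i'] (by simp) a (b::t)]
                have hpf : ['x','h','i'].isPrefixOf (a::b::t) = false := by
                  match t with
                  | [] => simp [List.isPrefixOf]
                  | c :: t' =>
                      have habc : ¬ (a = 'x' ∧ b = 'h' ∧ c = 'i') := by
                        intro ⟨h1, h2, h3⟩; subst h1; subst h2; subst h3
                        exact hx ⟨by simp [PySem.Chars.len]; omega, by simp [pysem]⟩
                      simp [List.isPrefixOf]
                      intro h1 h2 h3; exact habc ⟨h1.symm, h2.symm, h3.symm⟩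
                simp [hpf]
              rw [hcntHi, hcntXhi]

theorem countHi2Chars_eq (l : List Char) :
    countHi2Chars l =
      (PySem.Chars.count l ['h','i'] : Int) - (PySem.Chars.count l ['x','h','i'] : Int) :=
  countHi2Chars_aux l.length l (le_refl _)

-- ===== VERDICT (by name: the statement is the Claim_ definition above) =====
theorem count_hi2_spec : Claim_equal_count_hi2 := by
  intro s _
  show count_hi2 s = count_hi2_alt s
  simp only [count_hi2, count_hi2_alt, PySem.Str.count_eq]
  exact countHi2Chars_eq s.toList
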